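-- pv_equiv track=rewrite | github.com/JayUBee/Underwasser | src/utils/sequenceMapper.py | densest_interval
-- ===== SOURCE A (Python) =====
-- def densest_interval(f, n, window_size):
--     """
--     Finds the densest interval in f(x) = y where y is 0 or 1.
--
--     Parameters:
--     - f: list of integers (0 or 1) representing f(x)
--     - n: integer, the maximum value of x
--     - window_size: integer, the size of the sliding window
--
--     Returns:
--     - tuple (start, end) representing the densest interval
--     """
--     max_sum = 0
--     max_start = 0
--     current_sum = sum(f[:window_size])
--
--     for i in range(n - window_size + 1):
--         if current_sum > max_sum:
--             max_sum = current_sum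
--             max_start = i
--         if i + window_size < n:
--             current_sum = current_sum - f[i] + f[i + window_size]
--
--     return max_start, max_start + window_size - 1
-- ===== SOURCE B (Python) =====
-- def densest_interval(f, n, window_size):
--     prefix = [0]
--     s = 0
--     for v in f:
--         s += v
--         prefix.append(s)
--     max_sum = 0
--     max_start = 0
--     for i in range(n - window_size + 1):
--         window_sum = prefix[i + window_size] - prefix[i]
--         if window_sum > max_sum:
--             max_sum = window_sum
--             max_start = i
--     return max_start, max_start + window_size - 1
-- ===== Notes on version B (the rewrite author's own statement) =====
-- stated objective: alternative
-- what changed: B precomputes a prefix-sum array in one pass and obtains each window sum by random-access subtraction prefix[i+w]-prefix[i], replacing A's incrementally maintained running sum that reads f[i] and f[i+window_size] inside the loop.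
-- outside the precondition, e.g. on densest_interval([], 2, 2): A returns (0, 1), B raises IndexError; on densest_interval([1, 0, 1], 2, -1): A returns (2, 0), B returns (0, -2)
import Mathlib
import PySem

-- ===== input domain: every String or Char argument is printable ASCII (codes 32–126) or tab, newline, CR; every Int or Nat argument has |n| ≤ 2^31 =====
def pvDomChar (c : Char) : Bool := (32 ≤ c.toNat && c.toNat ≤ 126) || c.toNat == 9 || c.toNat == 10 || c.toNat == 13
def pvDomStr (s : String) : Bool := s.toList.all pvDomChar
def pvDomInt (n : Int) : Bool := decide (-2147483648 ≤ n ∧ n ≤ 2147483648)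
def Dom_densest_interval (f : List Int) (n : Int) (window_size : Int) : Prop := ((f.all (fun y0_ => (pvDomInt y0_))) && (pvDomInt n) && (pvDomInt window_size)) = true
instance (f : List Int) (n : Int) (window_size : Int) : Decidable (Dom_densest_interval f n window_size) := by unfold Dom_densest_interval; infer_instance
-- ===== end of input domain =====

-- B replaces A's incrementally maintained sliding-window sum by a precomputed prefix-sum
-- array with random-access subtraction (alternative decomposition, same cost).

-- ===== PORT A =====
-- loop state: (max_sum, max_start, current_sum)
def densest_interval (f : List Int) (n : Int) (window_size : Int) : Int × Int :=
  let cur0 : Int := (PySem.List.slice f none (some window_size)).sum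
  let st := (PySem.List.pyRange 0 (n - window_size + 1) 1).foldl
    (fun (st : Int × Int × Int) i =>
      let st1 := if st.2.2 > st.1 then (st.2.2, i, st.2.2) else st
      if i + window_size < n then
        (st1.1, st1.2.1, st1.2.2 - PySem.List.pyGetD f i 0 + PySem.List.pyGetD f (i + window_size) 0)
      else st1)
    (0, 0, cur0)
  (st.2.1, st.2.1 + window_size - 1)

-- ===== PORT B =====
-- prefix pass state: (prefix, s); scan state: (max_sum, max_start)
def densest_interval_alt (f : List Int) (n : Int) (window_size : Int) : Int × Int :=
  let ps := f.foldl (fun (acc : List Int × Int) v => (acc.1 ++ [acc.2 + v], acc.2 + v)) ([0], 0)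
  let pfx := ps.1
  let st := (PySem.List.pyRange 0 (n - window_size + 1) 1).foldl
    (fun (st : Int × Int) i =>
      let windowSum := PySem.List.pyGetD pfx (i + window_size) 0 - PySem.List.pyGetD pfx i 0
      if windowSum > st.1 then (windowSum, i) else st)
    (0, 0)
  (st.2, st.2 + window_size - 1)

-- ===== PRECONDITION & SPEC =====
-- Pre_ excludes inputs where A raises IndexError (window_size ≤ n but n > len(f)), and two kinds
-- of inputs where A still returns: negative window_size, where A's f[i+window_size] relies on
-- Python's negative-index wraparound (an accident B's prefix sums cannot share), and
-- window_size = n > len(f), where A's single loop iteration happens to perform no indexing.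
def Pre_densest_interval (f : List Int) (n : Int) (window_size : Int) : Prop :=
  n < window_size ∨ (0 ≤ window_size ∧ n ≤ (f.length : Int))
instance (f : List Int) (n : Int) (window_size : Int) : Decidable (Pre_densest_interval f n window_size) := by unfold Pre_densest_interval; infer_instance

def pvWitness_densest_interval : List Int × Int × Int := ([1, 0, 1, 1], 4, 2)

def Spec_densest_interval (f : List Int) (n : Int) (window_size : Int) (out : Int × Int) : Prop := out = densest_interval_alt f n window_size
instance (f : List Int) (n : Int) (window_size : Int) (out : Int × Int) : Decidable (Spec_densest_interval f n window_size out) := by unfold Spec_densest_interval; infer_instance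

-- ===== CLAIM (what is proved, stated in full; the proofs are below) =====
def Claim_equal_densest_interval : Prop := ∀ (f : List Int) (n : Int) (window_size : Int), Dom_densest_interval f n window_size → Pre_densest_interval f n window_size → Spec_densest_interval f n window_size (densest_interval f n window_size)

-- ===== LEMMAS AND PROOFS =====

-- the sum of the first j elements (both programs' window-sum vocabulary)
def pvP (f : List Int) (j : Int) : Int := (f.take j.toNat).sum

-- A's loop body, named for the proofs (definitionally the lambda in the port)
def pvStepA (f : List Int) (n window_size : Int) : Int × Int × Int → Int → Int × Int × Int :=
  fun st i =>
    let st1 := if st.2.2 > st.1 then (st.2.2, i, st.2.2) else st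
    if i + window_size < n then
      (st1.1, st1.2.1, st1.2.2 - PySem.List.pyGetD f i 0 + PySem.List.pyGetD f (i + window_size) 0)
    else st1

-- B's loop body with the prefix lookups replaced by pvP
def pvStepB (f : List Int) (window_size : Int) : Int × Int → Int → Int × Int :=
  fun st i =>
    if pvP f (i + window_size) - pvP f i > st.1 then (pvP f (i + window_size) - pvP f i, i) else st

def pvPfx (f : List Int) : List Int :=
  (f.foldl (fun (acc : List Int × Int) v => (acc.1 ++ [acc.2 + v], acc.2 + v)) ([0], 0)).1

lemma pvPortA_eq (f : List Int) (n window_size : Int) :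
    densest_interval f n window_size =
      (let st := (PySem.List.pyRange 0 (n - window_size + 1) 1).foldl (pvStepA f n window_size)
        (0, 0, (PySem.List.slice f none (some window_size)).sum)
       (st.2.1, st.2.1 + window_size - 1)) := rfl

lemma pvPortB_eq (f : List Int) (n window_size : Int) :
    densest_interval_alt f n window_size =
      (let st := (PySem.List.pyRange 0 (n - window_size + 1) 1).foldl
        (fun (st : Int × Int) i =>
          let windowSum := PySem.List.pyGetD (pvPfx f) (i + window_size) 0 - PySem.List.pyGetD (pvPfx f) i 0
          if windowSum > st.1 then (windowSum, i) else st)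
        (0, 0)
       (st.2, st.2 + window_size - 1)) := rfl

lemma pvPrefix_fold (f : List Int) : ∀ (acc : List Int) (s : Int),
    f.foldl (fun (acc : List Int × Int) v => (acc.1 ++ [acc.2 + v], acc.2 + v)) (acc, s)
      = (acc ++ (List.range f.length).map (fun k => s + (f.take (k+1)).sum), s + f.sum) := by
  induction f with
  | nil => intro acc s; simp
  | cons v tl ih =>
      intro acc s
      simp only [List.foldl_cons, ih (acc ++ [s + v]) (s + v), List.length_cons]
      refine Prod.ext ?_ (by simp [List.sum_cons]; ring)
      simp [List.range_succ_eq_map, List.map_map, Function.comp, List.append_assoc, add_assoc]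

lemma pvPfx_char (f : List Int) :
    pvPfx f = (List.range (f.length + 1)).map (fun k => ((f.take k).sum : Int)) := by
  rw [pvPfx, pvPrefix_fold]
  simp [List.range_succ_eq_map, List.map_map, Function.comp]

lemma pvPfx_get (f : List Int) (j : Int) (h0 : 0 ≤ j) (hj : j ≤ (f.length : Int)) :
    PySem.List.pyGetD (pvPfx f) j 0 = pvP f j := by
  rw [pvPfx_char, PySem.List.pyGetD_eq_getElem _ _ h0 (by simp; omega)]
  simp [pvP]

lemma pvP_succ (f : List Int) (j : Int) (h0 : 0 ≤ j) (hj : j < (f.length : Int)) :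
    pvP f (j + 1) = pvP f j + PySem.List.pyGetD f j 0 := by
  have hlt : j.toNat < f.length := by omega
  have hnat : (j + 1).toNat = j.toNat + 1 := by omega
  rw [PySem.List.pyGetD_eq_getElem _ _ h0 hj]
  have htake : f.take (j.toNat + 1) = f.take j.toNat ++ [f[j.toNat]] := by
    rw [List.take_add_one]
    simp [List.getElem?_eq_getElem hlt]
  rw [pvP, pvP, hnat, htake, List.sum_append, List.sum_cons, List.sum_nil, add_zero]

-- the two loops agree, given the running-sum invariant cur = pvP (a+w) - pvP a
lemma pvLoop (f : List Int) (n ws : Int) (hws : 0 ≤ ws) (hlen : n ≤ (f.length : Int)) :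
    ∀ (k : Nat) (a M S cur : Int), 0 ≤ a → a + k = n - ws + 1 →
      (a ≤ n - ws → cur = pvP f (a + ws) - pvP f a) →
      ((((PySem.List.pyRange a (n - ws + 1) 1).foldl (pvStepA f n ws) (M, S, cur)).1,
        ((PySem.List.pyRange a (n - ws + 1) 1).foldl (pvStepA f n ws) (M, S, cur)).2.1)
       = (PySem.List.pyRange a (n - ws + 1) 1).foldl (pvStepB f ws) (M, S)) := by
  intro k
  induction k with
  | zero =>
      intro a M S cur _ hk _
      rw [PySem.List.pyRange_one_eq_nil (by omega : n - ws + 1 ≤ a)]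
      rfl
  | succ k ih =>
      intro a M S cur ha hk hcur
      have hale : a ≤ n - ws := by omega
      have hcurW := hcur hale
      rw [PySem.List.pyRange_one_cons (by omega : a < n - ws + 1)]
      simp only [List.foldl_cons]
      have hA : pvStepA f n ws (M, S, cur) a =
          ((pvStepB f ws (M, S) a).1, (pvStepB f ws (M, S) a).2,
           if a + ws < n then cur - PySem.List.pyGetD f a 0 + PySem.List.pyGetD f (a + ws) 0 else cur) := by
        simp only [pvStepA, pvStepB, ← hcurW]
        by_cases h1 : cur > M <;> by_cases h2 : a + ws < n <;> simp [h1, h2]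
      rw [hA]
      exact ih (a + 1) (pvStepB f ws (M, S) a).1 (pvStepB f ws (M, S) a).2 _
        (by omega) (by omega)
        (by
          intro hle
          have hin : a + ws < n := by omega
          rw [if_pos hin, hcurW, show a + 1 + ws = (a + ws) + 1 by ring,
              pvP_succ f (a + ws) (by omega) (by omega),
              pvP_succ f a (by omega) (by omega)]
          ring)

-- ===== VERDICT (by name: the statement is the Claim_ definition above) =====
theorem densest_interval_spec : Claim_equal_densest_interval := by
  intro f n ws _ hpre
  unfold Spec_densest_interval
  rw [pvPortA_eq, pvPortB_eq]
  by_cases hle : n < ws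
  · rw [PySem.List.pyRange_one_eq_nil (by omega : n - ws + 1 ≤ 0)]
    rfl
  · obtain hws | ⟨hws, hlen⟩ := hpre
    · omega
    · have hBcongr :
          (PySem.List.pyRange 0 (n - ws + 1) 1).foldl
            (fun (st : Int × Int) i =>
              let windowSum := PySem.List.pyGetD (pvPfx f) (i + ws) 0 - PySem.List.pyGetD (pvPfx f) i 0
              if windowSum > st.1 then (windowSum, i) else st) (0, 0)
          = (PySem.List.pyRange 0 (n - ws + 1) 1).foldl (pvStepB f ws) (0, 0) := by
        refine PySem.List.foldl_congr_mem _ _ _ _ ?_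
        intro acc i hi
        obtain ⟨h0, h1⟩ := PySem.List.mem_pyRange_one.1 hi
        simp only [pvStepB,
          pvPfx_get f i h0 (by omega),
          pvPfx_get f (i + ws) (by omega) (by omega)]
      simp only [hBcongr]
      have hcur0 : (PySem.List.slice f none (some ws)).sum = pvP f (0 + ws) - pvP f 0 := by
        rw [PySem.List.slice_to f hws]
        simp [pvP]
      rw [hcur0]
      have := pvLoop f n ws hws hlen (n - ws + 1).toNat 0 0 0
        (pvP f (0 + ws) - pvP f 0) le_rfl (by omega) (fun _ => rfl)
      rw [← this]
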